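-- pv_equiv track=rewrite | github.com/Maouv/Minimal | min/backend/coder.py | _match_file
-- ===== SOURCE A (Python) =====
-- def _match_file(fname: str, files: dict[str, str]) -> str | None:
--     """
--     Match filename dari AI response ke path di context.
--     Fuzzy: coba exact, lalu suffix match.
--     """
--     # exact match
--     if fname in files:
--         return fname
--
--     # suffix match (AI kadang output nama file tanpa full path)
--     for path in files:
--         if path.endswith(fname) or path.endswith("/" + fname):
--             return path
--
--     # basename match
--     from pathlib import Path as P
--     target = P(fname).name
--     for path in files:
--         if P(path).name == target:
--             return path
--
--     return None
-- ===== SOURCE B (Python) =====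
-- # Single pass over files keeping the first suffix match and the first basename match.
-- def _match_file(fname: str, files: dict[str, str]) -> str | None:
--     if fname in files:
--         return fname
--     slash_fname = "/" + fname
--     target = _basename(fname)
--     suffix_hit = None
--     basename_hit = None
--     for path in files:
--         if suffix_hit is None and (path.endswith(fname) or path.endswith(slash_fname)):
--             suffix_hit = path
--         if basename_hit is None and _basename(path) == target:
--             basename_hit = path
--     return suffix_hit if suffix_hit is not None else basename_hit
--
-- def _basename(p: str) -> str:
--     parts = [c for c in p.split("/") if c not in ("", ".")]
--     return parts[-1] if parts else ""
-- ===== Notes on version B (the rewrite author's own statement) =====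
-- stated objective: faster
-- what changed: A's two sequential scans over the files (suffix scan, then basename scan) are replaced by a single pass recording the first suffix match and the first basename match in two candidate variables chosen by priority afterwards, and pathlib's Path(...).name per path is replaced by a direct split/filter basename computation (constant-factor speedup, measured).
import Mathlib
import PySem

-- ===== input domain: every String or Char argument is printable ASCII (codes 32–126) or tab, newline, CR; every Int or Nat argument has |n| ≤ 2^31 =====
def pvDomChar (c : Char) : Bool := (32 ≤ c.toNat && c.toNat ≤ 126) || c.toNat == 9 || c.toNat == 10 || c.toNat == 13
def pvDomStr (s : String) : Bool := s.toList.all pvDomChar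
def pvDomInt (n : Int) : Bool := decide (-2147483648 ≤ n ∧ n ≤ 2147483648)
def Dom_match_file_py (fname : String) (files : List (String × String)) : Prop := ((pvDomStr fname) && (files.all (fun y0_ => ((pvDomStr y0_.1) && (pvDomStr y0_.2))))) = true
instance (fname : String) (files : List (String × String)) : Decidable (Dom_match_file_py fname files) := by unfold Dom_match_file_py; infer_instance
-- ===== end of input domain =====

-- B replaces A's two sequential scans with one pass keeping two first-match candidates and computes basenames directly instead of via pathlib (measured faster in a timing run).

-- ===== PORT A =====
-- Exact model of pathlib PurePosixPath(p).name on plain string paths: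
-- the last '/'-separated component after dropping empty and '.' components ('' if none).
def pyBasename (p : String) : String :=
  match (((PySem.Str.split? p "/").getD []).filter (fun c => c != "" && c != ".")).getLast? with
  | some c => c
  | none => ""

def match_file_py (fname : String) (files : List (String × String)) : Option String :=
  -- exact match (dict key membership)
  if files.any (fun kv => kv.1 == fname) then some fname
  else
    -- suffix match: first key with path.endswith(fname) or path.endswith("/" + fname)
    match files.find? (fun kv => PySem.Str.endswith kv.1 fname || PySem.Str.endswith kv.1 ("/" ++ fname)) with
    | some kv => some kv.1
    | none =>
      -- basename match
      let target := pyBasename fname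
      match files.find? (fun kv => pyBasename kv.1 == target) with
      | some kv => some kv.1
      | none => none

-- ===== PORT B =====
-- loop body of B's single pass: record first suffix hit and first basename hit
def mfStep (fname slashFname target : String) (acc : Option String × Option String)
    (kv : String × String) : Option String × Option String :=
  let acc1 : Option String × Option String :=
    if acc.1.isNone && (PySem.Str.endswith kv.1 fname || PySem.Str.endswith kv.1 slashFname)
    then (some kv.1, acc.2) else acc
  if acc1.2.isNone && (pyBasename kv.1 == target) then (acc1.1, some kv.1) else acc1

def match_file_py_alt (fname : String) (files : List (String × String)) : Option String :=
  if files.any (fun kv => kv.1 == fname) then some fname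
  else
    let slashFname := "/" ++ fname
    let target := pyBasename fname
    let acc := files.foldl (mfStep fname slashFname target) (none, none)
    match acc.1 with
    | some p => some p
    | none => acc.2

-- ===== PRECONDITION & SPEC =====
def Spec_match_file_py (fname : String) (files : List (String × String)) (out : Option String) : Prop := out = match_file_py_alt fname files
instance (fname : String) (files : List (String × String)) (out : Option String) : Decidable (Spec_match_file_py fname files out) := by unfold Spec_match_file_py; infer_instance

-- ===== CLAIM (what is proved, stated in full; the proofs are below) =====
def Claim_equal_match_file_py : Prop := ∀ (fname : String) (files : List (String × String)), Dom_match_file_py fname files → Spec_match_file_py fname files (match_file_py fname files)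

-- ===== LEMMAS AND PROOFS =====

-- B's fold computes, in each component, the first match of the corresponding predicate
-- (once a component is set it never changes).
theorem mfStep_foldl (fname slashFname target : String) (l : List (String × String))
    (s b : Option String) :
    l.foldl (mfStep fname slashFname target) (s, b) =
      ((match s with
        | some x => some x
        | none => (l.find? (fun kv => PySem.Str.endswith kv.1 fname || PySem.Str.endswith kv.1 slashFname)).map Prod.fst),
       (match b with
        | some x => some x
        | none => (l.find? (fun kv => pyBasename kv.1 == target)).map Prod.fst)) := by
  induction l generalizing s b with
  | nil => cases s <;> cases b <;> simp
  | cons kv l ih =>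
    simp only [List.foldl_cons, mfStep]
    by_cases hp : (PySem.Str.endswith kv.1 fname || PySem.Str.endswith kv.1 slashFname) = true <;>
    by_cases hb : (pyBasename kv.1 == target) = true <;>
    cases s <;> cases b <;>
    simp_all

theorem match_file_py_spec : Claim_equal_match_file_py := by
  intro fname files _
  unfold Spec_match_file_py match_file_py match_file_py_alt
  by_cases hx : files.any (fun kv => kv.1 == fname) = true
  · simp [hx]
  · simp only [hx,
      mfStep_foldl fname ("/" ++ fname) (pyBasename fname) files none none]
    cases files.find? (fun kv => PySem.Str.endswith kv.1 fname || PySem.Str.endswith kv.1 ("/" ++ fname)) with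
    | some kv => simp
    | none =>
      cases files.find? (fun kv => pyBasename kv.1 == pyBasename fname) with
      | some kv => simp
      | none => simp
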